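-- pv_equiv track=rewrite | github.com/onelifefyi/problem-solving | EPI/Legacy/4primitive_types/4same_weight.py | closest_int_same_bit_count
-- ===== SOURCE A (Python) =====
-- def closest_int_same_bit_count(num):
--     position = 0
--     while True:
--         if (num>>position & 1) != (num>>(position+1) & 1):
--             mask = 1<<position | 1<<(position+1)
--             num = num ^ mask
--             break
--         position += 1
--     return num
-- ===== SOURCE B (Python) =====
-- def closest_int_same_bit_count(num):
--     # bit i of d is set iff bits i and i+1 of num differ
--     d = num ^ (num >> 1)
--     # lowest set bit of d = first position where adjacent bits differ
--     lsb = d & -d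
--     # swap that adjacent pair of bits
--     return num ^ (lsb | (lsb << 1))
-- ===== Notes on version B (the rewrite author's own statement) =====
-- stated objective: alternative
-- what changed: Replaces A's sequential per-bit scan for the first differing adjacent bit pair by closed-form bit arithmetic: d = num ^ (num >> 1) marks differing adjacent pairs and d & -d isolates the lowest one; Pre_ excludes num in {0, -1}, where A's scan never finds a differing pair and loops forever while B returns num unchanged.
-- outside the precondition, e.g. on closest_int_same_bit_count(0): A does not finish within the time limit, B returns 0; on closest_int_same_bit_count(-1): A does not finish within the time limit, B returns -1
import Mathlib
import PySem

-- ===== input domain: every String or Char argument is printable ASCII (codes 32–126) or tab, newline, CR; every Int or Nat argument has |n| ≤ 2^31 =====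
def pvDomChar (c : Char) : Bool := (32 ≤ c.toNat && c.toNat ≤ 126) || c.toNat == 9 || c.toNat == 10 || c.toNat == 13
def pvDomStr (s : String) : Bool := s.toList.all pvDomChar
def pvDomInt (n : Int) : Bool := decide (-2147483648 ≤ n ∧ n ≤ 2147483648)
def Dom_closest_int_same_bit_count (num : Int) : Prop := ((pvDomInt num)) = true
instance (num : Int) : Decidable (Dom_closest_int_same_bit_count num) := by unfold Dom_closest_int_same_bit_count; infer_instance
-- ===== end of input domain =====

-- B replaces A's per-position scanning loop by closed-form bit arithmetic (num ^ (num>>1), then d & -d);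
-- Pre_ excludes num ∈ {0,-1}, where A's scan never finds a differing adjacent bit pair and loops forever.


-- ===== PORT A =====
-- A's 'while True' scan; fuel 64 is enough on every admitted input (under Dom and Pre_ the
-- first differing adjacent bit pair sits at a position < 32, proved below), so the 0-fuel
-- branch is never reached there.
def closestLoop (num : Int) (position : Nat) : Nat → Int
  | 0 => 0
  | fuel + 1 =>
    if PySem.Int.band (num >>> position) 1 ≠ PySem.Int.band (num >>> (position + 1)) 1 then
      -- mask = 1<<position | 1<<(position+1); num = num ^ mask; break
      PySem.Int.bxor num (PySem.Int.bor ((1 : Int) <<< position) ((1 : Int) <<< (position + 1)))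
    else
      closestLoop num (position + 1) fuel

def closest_int_same_bit_count (num : Int) : Int :=
  closestLoop num 0 64

-- ===== PORT B =====
def closest_int_same_bit_count_alt (num : Int) : Int :=
  let d := PySem.Int.bxor num (num >>> (1:Nat))
  let lsb := PySem.Int.band d (-d)
  PySem.Int.bxor num (PySem.Int.bor lsb (lsb <<< (1:Nat)))

-- ===== PRECONDITION & SPEC =====
-- Pre_ excludes exactly num = 0 and num = -1: there all adjacent bit pairs are equal, so A's
-- scan never breaks and Python A loops forever (returns nothing).
def Pre_closest_int_same_bit_count (num : Int) : Prop := num ≠ 0 ∧ num ≠ -1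
instance (num : Int) : Decidable (Pre_closest_int_same_bit_count num) := by unfold Pre_closest_int_same_bit_count; infer_instance
def pvWitness_closest_int_same_bit_count : Int := 5

def Spec_closest_int_same_bit_count (num : Int) (out : Int) : Prop := out = closest_int_same_bit_count_alt num
instance (num : Int) (out : Int) : Decidable (Spec_closest_int_same_bit_count num out) := by unfold Spec_closest_int_same_bit_count; infer_instance

-- ===== CLAIM (what is proved, stated in full; the proofs are below) =====
def Claim_equal_closest_int_same_bit_count : Prop := ∀ (num : Int), Dom_closest_int_same_bit_count num → Pre_closest_int_same_bit_count num → Spec_closest_int_same_bit_count num (closest_int_same_bit_count num)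

-- ===== LEMMAS AND PROOFS =====

-- The underlying bit pattern: for num ≥ 0 its own bits, for num = -(m+1) the bits of m
-- (the complement pattern; adjacent-bit differences are the same for both).
def pvBits (num : Int) : Nat :=
  match num with
  | .ofNat n => n
  | .negSucc m => m

-- d = num ^ (num >> 1) seen on the bit pattern
def pvE (num : Int) : Nat := pvBits num ^^^ (pvBits num >>> 1)

lemma shiftRight_natCast (n q : Nat) : ((n : Int)) >>> q = ((n >>> q : Nat) : Int) := rfl
lemma shiftRight_negSucc (m q : Nat) : (Int.negSucc m) >>> q = Int.negSucc (m >>> q) := rfl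
lemma shiftLeft_natCast (n q : Nat) : ((n : Int)) <<< q = ((n <<< q : Nat) : Int) := rfl

lemma bxor_num_shift (num : Int) :
    PySem.Int.bxor num (num >>> (1:Nat)) = ((pvE num : Nat) : Int) := by
  cases num with
  | ofNat n =>
      show PySem.Int.bxor (n : Int) ((n : Int) >>> (1:Nat)) = _
      rw [shiftRight_natCast, PySem.Int.bxor_natCast]
      simp [pvE, pvBits]
  | negSucc m =>
      rw [shiftRight_negSucc]
      simp only [PySem.Int.bxor, pvE, pvBits]
      have h1 : ¬ (0:Int) ≤ Int.negSucc m := by omega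
      have h2 : ¬ (0:Int) ≤ Int.negSucc (m >>> 1) := by omega
      rw [if_neg h1, if_neg h2]
      have e1 : (-Int.negSucc m - 1).toNat = m := by rw [Int.negSucc_eq]; omega
      have e2 : (-Int.negSucc (m >>> 1) - 1).toNat = m >>> 1 := by rw [Int.negSucc_eq]; omega
      rw [e1, e2]

lemma mod_two_natCast (a : Nat) : PySem.Int.mod ((a : Int)) 2 = ((a % 2 : Nat) : Int) := by
  rw [PySem.Int.mod_eq_emod_of_pos (by norm_num)]
  omega

lemma mod_two_negSucc (t : Nat) : PySem.Int.mod (Int.negSucc t) 2 = 1 - ((t % 2 : Nat) : Int) := by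
  rw [PySem.Int.mod_eq_emod_of_pos (by norm_num), Int.negSucc_eq]
  omega

-- parity of a shifted number as a testBit
lemma testBit_parity (n q : Nat) :
    ((n >>> q) % 2 ≠ (n >>> (q+1)) % 2) ↔ (n.testBit q ^^ n.testBit (q + 1)) = true := by
  rw [show n.testBit q = (n >>> q).testBit 0 by simp,
      show n.testBit (q+1) = (n >>> (q+1)).testBit 0 by simp,
      Nat.testBit_zero, Nat.testBit_zero]
  rcases Nat.mod_two_eq_zero_or_one (n >>> q) with h | h <;>
    rcases Nat.mod_two_eq_zero_or_one (n >>> (q+1)) with h' | h' <;>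
    simp [h, h']

-- A's loop condition at position q is exactly bit q of pvE num
lemma cond_iff (num : Int) (q : Nat) :
    (PySem.Int.band (num >>> q) 1 ≠ PySem.Int.band (num >>> (q + 1)) 1)
      ↔ (pvE num).testBit q = true := by
  have hbit : ∀ n, (pvE num = n ^^^ (n >>> 1)) →
      ((pvE num).testBit q = (n.testBit q ^^ n.testBit (q + 1))) := by
    intro n hn
    simp [hn, Nat.testBit_xor, Nat.testBit_shiftRight, Nat.add_comm 1 q]
  rw [PySem.Int.band_one, PySem.Int.band_one]
  cases num with
  | ofNat n =>
      show PySem.Int.mod ((n:Int) >>> q) 2 ≠ PySem.Int.mod ((n:Int) >>> (q+1)) 2 ↔ _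
      rw [shiftRight_natCast, shiftRight_natCast, mod_two_natCast, mod_two_natCast,
          hbit n rfl, ← testBit_parity n q]
      exact ⟨fun h hc => h (by exact_mod_cast hc), fun h hc => h (by exact_mod_cast hc)⟩
  | negSucc m =>
      rw [shiftRight_negSucc, shiftRight_negSucc, mod_two_negSucc, mod_two_negSucc,
          hbit m rfl, ← testBit_parity m q]
      constructor <;> intro h hc <;> exact h (by omega)

-- Nat facts for d & -d
lemma land_double (t : Nat) (ht : 1 ≤ t) : (2*t) &&& (2*t - 1) = 2 * (t &&& (t-1)) := by
  apply Nat.eq_of_testBit_eq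
  intro i
  cases i with
  | zero =>
      simp [Nat.testBit_zero, Nat.mul_mod_right]
  | succ i =>
      have h2 : (2*t-1)/2 = t-1 := by omega
      have h3 : (2*t)/2 = t := by omega
      have h4 : (2*(t &&& (t-1)))/2 = t &&& (t-1) := by omega
      rw [Nat.testBit_land]
      simp only [Nat.testBit_succ]
      rw [h2, h3, h4, Nat.testBit_land]

lemma land_odd (t : Nat) : (2*t+1) &&& (2*t) = 2*t := by
  apply Nat.eq_of_testBit_eq
  intro i
  cases i with
  | zero =>
      simp [Nat.testBit_zero, Nat.mul_mod_right]
  | succ i =>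
      have h2 : (2*t+1)/2 = t := by omega
      have h3 : (2*t)/2 = t := by omega
      rw [Nat.testBit_land]
      simp only [Nat.testBit_succ]
      rw [h2, h3]
      exact Bool.and_self _

-- e - (e & (e-1)) isolates the lowest set bit
lemma sub_land_pred (p : Nat) : ∀ e : Nat, e.testBit p = true →
    (∀ q, q < p → e.testBit q = false) → e - (e &&& (e-1)) = 2^p := by
  induction p with
  | zero =>
      intro e he _
      have h1 : e % 2 = 1 := by simpa [Nat.testBit_zero] using he
      obtain ⟨t, rfl⟩ : ∃ t, e = 2*t+1 := ⟨e/2, by omega⟩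
      have h5 : (2*t+1) - 1 = 2*t := by omega
      rw [h5, land_odd]
      omega
  | succ p ih =>
      intro e he hlow
      have h0 : e % 2 = 0 := by
        have := hlow 0 (Nat.succ_pos p)
        simpa [Nat.testBit_zero] using this
      obtain ⟨t, rfl⟩ : ∃ t, e = 2*t := ⟨e/2, by omega⟩
      have hdiv : (2*t)/2 = t := by omega
      have htp : t.testBit p = true := by
        have h := he
        simp only [Nat.testBit_succ, hdiv] at h
        exact h
      have htlow : ∀ q, q < p → t.testBit q = false := by
        intro q hq
        have h := hlow (q+1) (by omega)
        simp only [Nat.testBit_succ, hdiv] at h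
        exact h
      have ht1 : 1 ≤ t := by
        rcases Nat.eq_zero_or_pos t with h | h
        · subst h; simp at htp
        · exact h
      have hle : 2^p ≤ t := Nat.ge_two_pow_of_testBit htp
      have ihe := ih t htp htlow
      rw [land_double t ht1]
      have hland_le : t &&& (t-1) ≤ t := Nat.and_le_left
      rw [pow_succ]
      omega

-- d & -d on the Int side
lemma band_neg_self (e : Nat) (he : e ≠ 0) :
    PySem.Int.band ((e : Int)) (-(e : Int)) = (((e - (e &&& (e-1)) : Nat)) : Int) := by
  have h1 : (0:Int) ≤ (e : Int) := by exact_mod_cast Nat.zero_le e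
  have h2 : ¬ (0:Int) ≤ -(e : Int) := by omega
  simp only [PySem.Int.band, if_pos h1, if_neg h2]
  congr 1
  have h3 : (-(-(e:Int)) - 1).toNat = e - 1 := by omega
  rw [h3, Int.toNat_natCast]

-- evaluating A's loop when the first set bit of pvE num at or above pos is p
lemma loop_eval (num : Int) : ∀ (fuel pos p : Nat), pos ≤ p → p < pos + fuel →
    (∀ q, pos ≤ q → q < p → (pvE num).testBit q = false) → (pvE num).testBit p = true →
    closestLoop num pos fuel =
      PySem.Int.bxor num (PySem.Int.bor ((1 : Int) <<< p) ((1 : Int) <<< (p + 1))) := by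
  intro fuel
  induction fuel with
  | zero => intro pos p h1 h2 _ _; omega
  | succ fuel ih =>
      intro pos p h1 h2 hlow hp
      rw [closestLoop]
      by_cases hc : PySem.Int.band (num >>> pos) 1 ≠ PySem.Int.band (num >>> (pos + 1)) 1
      · rw [if_pos hc]
        have hbit := (cond_iff num pos).1 hc
        have hpp : pos = p := by
          by_contra hne
          have hlt : pos < p := lt_of_le_of_ne h1 hne
          rw [hlow pos le_rfl hlt] at hbit
          exact Bool.false_ne_true hbit
        rw [hpp]
      · rw [if_neg hc]
        have hbit : (pvE num).testBit pos = false := by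
          by_contra h
          exact hc ((cond_iff num pos).2 (by simpa using h))
        have hne : pos ≠ p := by intro h; rw [h, hp] at hbit; simp at hbit
        exact ih (pos+1) p (by omega) (by omega)
          (fun q hq hq' => hlow q (by omega) hq') hp

-- ===== VERDICT (by name: the statement is the Claim_ definition above) =====
theorem closest_int_same_bit_count_spec : Claim_equal_closest_int_same_bit_count := by
  intro num hDom hPre
  simp only [Spec_closest_int_same_bit_count, closest_int_same_bit_count,
    closest_int_same_bit_count_alt]
  -- the bit pattern is nonzero and bounded
  have hne : pvE num ≠ 0 := by
    intro h
    have heq := Nat.xor_eq_zero_iff.1 h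
    have hhalf : pvBits num = pvBits num / 2 := by
      conv_lhs => rw [heq]
      rw [Nat.shiftRight_one]
    have hz : pvBits num = 0 := by omega
    cases num with
    | ofNat n =>
        have : n = 0 := by simpa [pvBits] using hz
        exact hPre.1 (by simp [this])
    | negSucc m =>
        have : m = 0 := by simpa [pvBits] using hz
        exact hPre.2 (by simp [this, Int.negSucc_eq])
  have hboundN : pvBits num < 2^32 := by
    have hd : -2147483648 ≤ num ∧ num ≤ 2147483648 := by
      have h := hDom; unfold Dom_closest_int_same_bit_count pvDomInt at h
      exact of_decide_eq_true h
    cases num with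
    | ofNat n =>
        have h1 : (n:Int) ≤ 2147483648 := hd.2
        have h2 : n ≤ 2147483648 := by exact_mod_cast h1
        simp only [pvBits]; omega
    | negSucc m =>
        have h1 : -2147483648 ≤ Int.negSucc m := hd.1
        rw [Int.negSucc_eq] at h1
        have h2 : m ≤ 2147483647 := by omega
        simp only [pvBits]; omega
  have hboundE : pvE num < 2^32 :=
    Nat.xor_lt_two_pow hboundN (lt_of_le_of_lt (Nat.shiftRight_le _ _) hboundN)
  -- p = the least set bit of pvE num
  have hex : ∃ k, (pvE num).testBit k = true := Nat.exists_testBit_of_ne_zero hne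
  have hp : (pvE num).testBit (Nat.find hex) = true := Nat.find_spec hex
  have hlow : ∀ q, q < Nat.find hex → (pvE num).testBit q = false := by
    intro q hq
    have := Nat.find_min hex hq
    simpa using this
  have hple : 2^(Nat.find hex) ≤ pvE num := Nat.ge_two_pow_of_testBit hp
  have hp32 : Nat.find hex < 32 := by
    by_contra h
    have : (2:Nat)^32 ≤ 2^(Nat.find hex) := Nat.pow_le_pow_right (by norm_num) (by omega)
    omega
  -- A side
  rw [loop_eval num 64 0 (Nat.find hex) (Nat.zero_le _) (by omega)
      (fun q _ hq => hlow q hq) hp]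
  -- B side
  rw [bxor_num_shift num, band_neg_self (pvE num) hne,
      sub_land_pred (Nat.find hex) (pvE num) hp hlow]
  -- both masks are 2^p | 2^(p+1)
  have e1 : ∀ k : Nat, (1 : Int) <<< k = ((2^k : Nat) : Int) := by
    intro k
    rw [show (1:Int) = ((1:Nat) : Int) from rfl, shiftLeft_natCast, Nat.one_shiftLeft]
  have e3 : (((2^(Nat.find hex) : Nat)) : Int) <<< (1:Nat) = ((2^(Nat.find hex + 1) : Nat) : Int) := by
    rw [shiftLeft_natCast, Nat.shiftLeft_eq]
    norm_num [pow_succ]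
  rw [e1, e1, e3]
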